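-- pv_equiv track=rewrite | github.com/GranusClarvis/clarvis | scripts/world_models.py | _infer_strategy
-- ===== SOURCE A (Python) =====
-- def _infer_strategy(task):
--     """Infer strategy from task text (shared with causal_model.py)."""
--     words = task.lower().split()
--     if any(w in words for w in ["fix", "repair", "debug"]):
--         return "fix"
--     elif any(w in words for w in ["implement", "build", "create", "add"]):
--         return "implement"
--     elif any(w in words for w in ["research", "investigate", "study", "analyze"]):
--         return "research"
--     elif any(w in words for w in ["optimize", "improve", "boost", "reduce"]):
--         return "optimize"
--     elif any(w in words for w in ["test", "benchmark", "verify"]):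
--         return "test"
--     elif any(w in words for w in ["wire", "connect", "integrate"]):
--         return "wire"
--     return "unknown"
-- ===== SOURCE B (Python) =====
-- _KEYWORD_LABEL = {
--     "fix": "fix", "repair": "fix", "debug": "fix",
--     "implement": "implement", "build": "implement", "create": "implement", "add": "implement",
--     "research": "research", "investigate": "research", "study": "research", "analyze": "research",
--     "optimize": "optimize", "improve": "optimize", "boost": "optimize", "reduce": "optimize",
--     "test": "test", "benchmark": "test", "verify": "test",
--     "wire": "wire", "connect": "wire", "integrate": "wire",
-- }
--
-- _PRIORITY = ["fix", "implement", "research", "optimize", "test", "wire"]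
--
--
-- def _infer_strategy(task):
--     """Infer strategy from task text: one indexing pass, then a priority scan."""
--     matched = set()
--     for w in task.lower().split():
--         label = _KEYWORD_LABEL.get(w)
--         if label is not None:
--             matched.add(label)
--     for label in _PRIORITY:
--         if label in matched:
--             return label
--     return "unknown"
-- ===== Notes on version B (the rewrite author's own statement) =====
-- stated objective: idiomatic
-- what changed: Replaced the group-by-group any()-membership if/elif chain with a single keyword->label dict lookup pass over the words building a set of matched labels, then a scan of a priority list for the first matched label.
import Mathlib
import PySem

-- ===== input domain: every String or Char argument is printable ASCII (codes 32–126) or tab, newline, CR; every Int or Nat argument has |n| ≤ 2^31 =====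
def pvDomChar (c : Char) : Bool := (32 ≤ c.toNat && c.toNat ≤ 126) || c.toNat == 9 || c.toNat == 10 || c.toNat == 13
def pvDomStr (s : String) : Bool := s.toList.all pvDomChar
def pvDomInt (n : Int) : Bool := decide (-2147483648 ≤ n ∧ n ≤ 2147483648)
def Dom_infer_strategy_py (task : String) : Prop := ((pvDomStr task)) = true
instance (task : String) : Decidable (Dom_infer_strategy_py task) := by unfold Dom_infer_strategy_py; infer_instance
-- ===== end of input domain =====

-- B replaces the group-by-group any()-membership if/elif chain by one keyword->label dict
-- lookup pass building a set of matched labels, then a scan of a priority list (idiomatic).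

-- ===== PORT A =====
def infer_strategy_py (task : String) : String :=
  let words := PySem.Str.split₀ (PySem.Str.lower task)
  if (["fix", "repair", "debug"] : List String).any (fun w => words.contains w) then "fix"
  else if (["implement", "build", "create", "add"] : List String).any (fun w => words.contains w) then "implement"
  else if (["research", "investigate", "study", "analyze"] : List String).any (fun w => words.contains w) then "research"
  else if (["optimize", "improve", "boost", "reduce"] : List String).any (fun w => words.contains w) then "optimize"
  else if (["test", "benchmark", "verify"] : List String).any (fun w => words.contains w) then "test"
  else if (["wire", "connect", "integrate"] : List String).any (fun w => words.contains w) then "wire"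
  else "unknown"

-- ===== PORT B =====
-- the module-level keyword -> label dict of Source B (all keys distinct, insertion order)
def pvKwMap : PySem.Dict String String := PySem.Dict.mk
  [("fix","fix"),("repair","fix"),("debug","fix"),
   ("implement","implement"),("build","implement"),("create","implement"),("add","implement"),
   ("research","research"),("investigate","research"),("study","research"),("analyze","research"),
   ("optimize","optimize"),("improve","optimize"),("boost","optimize"),("reduce","optimize"),
   ("test","test"),("benchmark","test"),("verify","test"),
   ("wire","wire"),("connect","wire"),("integrate","wire")]

-- the module-level priority list of Source B
def pvPriority : List String := ["fix", "implement", "research", "optimize", "test", "wire"]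

def infer_strategy_py_alt (task : String) : String :=
  let matched : PySem.Set String :=
    (PySem.Str.split₀ (PySem.Str.lower task)).foldl
      (fun s w => match pvKwMap.get? w with
        | some lab => PySem.Set.add s lab
        | none => s) PySem.Set.empty
  -- the 'for label in _PRIORITY: if label in matched: return label' loop, then 'unknown'
  match pvPriority.find? (fun lab => PySem.Set.contains matched lab) with
  | some lab => lab
  | none => "unknown"

-- ===== PRECONDITION & SPEC =====
def Spec_infer_strategy_py (task : String) (out : String) : Prop := out = infer_strategy_py_alt task
instance (task : String) (out : String) : Decidable (Spec_infer_strategy_py task out) := by unfold Spec_infer_strategy_py; infer_instance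

-- ===== CLAIM (what is proved, stated in full; the proofs are below) =====
def Claim_equal_infer_strategy_py : Prop := ∀ (task : String), Dom_infer_strategy_py task → Spec_infer_strategy_py task (infer_strategy_py task)

-- ===== LEMMAS AND PROOFS =====

-- all 21 keywords of pvKwMap, in order
def pvAllKeys : List String :=
  ["fix","repair","debug","implement","build","create","add","research","investigate","study",
   "analyze","optimize","improve","boost","reduce","test","benchmark","verify","wire","connect","integrate"]

lemma pv_get?_none (w : String) (h : ¬ w ∈ pvAllKeys) : pvKwMap.get? w = none := by
  simp only [PySem.Dict.get?, Option.map_eq_none_iff, List.find?_eq_none]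
  rintro ⟨k, v⟩ hp
  simp only [beq_iff_eq]
  intro e
  apply h
  subst e
  have := List.mem_map_of_mem (f := Prod.fst) hp
  simpa [pvKwMap, pvAllKeys] using this

lemma pv_kw_fix (w : String) :
    (pvKwMap.get? w == some "fix") = ("fix" == w || ("repair" == w || "debug" == w)) := by
  by_cases h : w ∈ pvAllKeys
  · fin_cases h <;> decide
  · rw [Bool.eq_iff_iff]
    simp only [beq_iff_eq, Bool.or_eq_true, pv_get?_none w h]
    constructor
    · intro hc; exact absurd hc (by simp)
    · rintro (rfl | rfl | rfl) <;> exact absurd (by decide) h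

lemma pv_kw_implement (w : String) :
    (pvKwMap.get? w == some "implement") = ("implement" == w || ("build" == w || ("create" == w || "add" == w))) := by
  by_cases h : w ∈ pvAllKeys
  · fin_cases h <;> decide
  · rw [Bool.eq_iff_iff]
    simp only [beq_iff_eq, Bool.or_eq_true, pv_get?_none w h]
    constructor
    · intro hc; exact absurd hc (by simp)
    · rintro (rfl | rfl | rfl | rfl) <;> exact absurd (by decide) h

lemma pv_kw_research (w : String) :
    (pvKwMap.get? w == some "research") = ("research" == w || ("investigate" == w || ("study" == w || "analyze" == w))) := by
  by_cases h : w ∈ pvAllKeys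
  · fin_cases h <;> decide
  · rw [Bool.eq_iff_iff]
    simp only [beq_iff_eq, Bool.or_eq_true, pv_get?_none w h]
    constructor
    · intro hc; exact absurd hc (by simp)
    · rintro (rfl | rfl | rfl | rfl) <;> exact absurd (by decide) h

lemma pv_kw_optimize (w : String) :
    (pvKwMap.get? w == some "optimize") = ("optimize" == w || ("improve" == w || ("boost" == w || "reduce" == w))) := by
  by_cases h : w ∈ pvAllKeys
  · fin_cases h <;> decide
  · rw [Bool.eq_iff_iff]
    simp only [beq_iff_eq, Bool.or_eq_true, pv_get?_none w h]
    constructor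
    · intro hc; exact absurd hc (by simp)
    · rintro (rfl | rfl | rfl | rfl) <;> exact absurd (by decide) h

lemma pv_kw_test (w : String) :
    (pvKwMap.get? w == some "test") = ("test" == w || ("benchmark" == w || "verify" == w)) := by
  by_cases h : w ∈ pvAllKeys
  · fin_cases h <;> decide
  · rw [Bool.eq_iff_iff]
    simp only [beq_iff_eq, Bool.or_eq_true, pv_get?_none w h]
    constructor
    · intro hc; exact absurd hc (by simp)
    · rintro (rfl | rfl | rfl) <;> exact absurd (by decide) h

lemma pv_kw_wire (w : String) :
    (pvKwMap.get? w == some "wire") = ("wire" == w || ("connect" == w || "integrate" == w)) := by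
  by_cases h : w ∈ pvAllKeys
  · fin_cases h <;> decide
  · rw [Bool.eq_iff_iff]
    simp only [beq_iff_eq, Bool.or_eq_true, pv_get?_none w h]
    constructor
    · intro hc; exact absurd hc (by simp)
    · rintro (rfl | rfl | rfl) <;> exact absurd (by decide) h

lemma pv_any_or_split (ws : List String) (p q : String → Bool) :
    ws.any (fun w => p w || q w) = (ws.any p || ws.any q) := by
  induction ws with
  | nil => simp
  | cons w ws ih => simp only [List.any_cons, ih]; cases p w <;> cases q w <;> simp

lemma pv_contains_add (s : PySem.Set String) (x y : String) :
    PySem.Set.contains (PySem.Set.add s x) y = (PySem.Set.contains s y || y == x) := by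
  rw [Bool.eq_iff_iff]
  simp [PySem.Set.contains, PySem.Set.mem_add]

lemma pv_contains_fold (ws : List String) (s : PySem.Set String) (l : String) :
    PySem.Set.contains
      (ws.foldl (fun s w => match pvKwMap.get? w with
        | some lab => PySem.Set.add s lab
        | none => s) s) l
      = (PySem.Set.contains s l || ws.any (fun w => pvKwMap.get? w == some l)) := by
  induction ws generalizing s with
  | nil => simp
  | cons w ws ih =>
    rw [List.foldl_cons, ih, List.any_cons]
    cases hg : pvKwMap.get? w with
    | none => simp
    | some lab =>
      rw [show (match (some lab : Option String) with | some lab => s.add lab | none => s) = s.add lab from rfl,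
         pv_contains_add]
      have h2 : ((some lab : Option String) == some l) = (lab == l) := rfl
      rw [h2]
      by_cases he : lab = l
      · subst he; simp
      · have e1 : (lab == l) = false := by simp [he]
        have e2 : (l == lab) = false := by simp [Ne.symm he]
        simp [e1, e2]

-- ===== VERDICT (by name: the statement is the Claim_ definition above) =====
theorem infer_strategy_py_spec : Claim_equal_infer_strategy_py := by
  intro task _
  unfold Spec_infer_strategy_py infer_strategy_py infer_strategy_py_alt
  generalize PySem.Str.split₀ (PySem.Str.lower task) = ws
  simp only [pvPriority, List.find?_cons, List.find?_nil, pv_contains_fold,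
    show ∀ l : String, PySem.Set.contains PySem.Set.empty l = false from fun _ => rfl,
    Bool.false_or, pv_kw_fix, pv_kw_implement, pv_kw_research, pv_kw_optimize, pv_kw_test,
    pv_kw_wire, pv_any_or_split, List.any_beq, List.any_cons, List.any_nil, Bool.or_false]
  split_ifs <;> (simp only [Bool.not_eq_true] at *) <;> simp only [*]
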